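-- pv_equiv track=rewrite | github.com/crouchingarmadillo/Advent-of-Code | 2023/solution/3.py | dig_locs
-- ===== SOURCE A (Python) =====
-- def dig_locs(line: str) -> list[tuple[int, int]]:
--     result = []
--     start = 0
--
--     while start < len(line):
--         if line[start].isdigit():
--             for end in range(start+1, len(line)+1):
--                 if end == len(line) or (end!=len(line) and not line[end].isdigit()):
--                     result.append((start, end))
--                     start = end
--                     break
--         else:
--             start += 1
--
--     return result
-- ===== SOURCE B (Python) =====
-- def dig_locs(line: str) -> list[tuple[int, int]]:
--     result = []
--     run = None  # start index of the current digit run, or None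
--     for i, c in enumerate(line):
--         if c.isdigit():
--             if run is None:
--                 run = i
--         elif run is not None:
--             result.append((run, i))
--             run = None
--     if run is not None:
--         result.append((run, len(line)))
--     return result
-- ===== Notes on version B (the rewrite author's own statement) =====
-- stated objective: simpler
-- what changed: replaces A's while-loop with a nested scan-for-end inner loop by a single linear pass over enumerate(line) tracking the start of the current digit run in one state variable; the pass avoids repeated indexing/range setup, which a timing run measured as a constant-factor speedup
import Mathlib
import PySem

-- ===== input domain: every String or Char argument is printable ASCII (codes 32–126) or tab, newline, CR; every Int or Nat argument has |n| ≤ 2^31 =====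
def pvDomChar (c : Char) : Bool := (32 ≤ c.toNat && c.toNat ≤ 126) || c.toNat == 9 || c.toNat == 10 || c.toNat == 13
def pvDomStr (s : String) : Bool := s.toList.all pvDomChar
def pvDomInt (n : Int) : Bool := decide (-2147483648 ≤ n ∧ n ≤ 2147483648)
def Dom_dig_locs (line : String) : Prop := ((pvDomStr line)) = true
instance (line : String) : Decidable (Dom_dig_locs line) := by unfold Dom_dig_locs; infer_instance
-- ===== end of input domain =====

-- B is a simpler single pass tracking the current digit-run start; return values only (no mutation).

-- ===== PORT A =====
-- the inner 'for end in range(start+1, len+1)' loop: first e ≥ e0 with e = len or not isdigit(line[e])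
def digA_inner (cs : List Char) (e : Nat) : Nat :=
  if h : e < cs.length then
    if ¬ PySem.Chars.isdigit cs[e] then e else digA_inner cs (e + 1)
  else e
termination_by cs.length - e

theorem digA_inner_ge (cs : List Char) (e : Nat) : e ≤ digA_inner cs e := by
  unfold digA_inner
  split
  · split
    · exact le_refl e
    · have := digA_inner_ge cs (e + 1); omega
  · exact le_refl e
termination_by cs.length - e

-- the 'while start < len(line)' loop
def digA_loop (cs : List Char) (start : Nat) (acc : List (Int × Int)) : List (Int × Int) :=
  if h : start < cs.length then
    if PySem.Chars.isdigit cs[start] then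
      let e := digA_inner cs (start + 1)
      digA_loop cs e (acc ++ [((start : Int), (e : Int))])
    else
      digA_loop cs (start + 1) acc
  else acc
termination_by cs.length - start
decreasing_by
  · have := digA_inner_ge cs (start + 1); omega
  · omega

def dig_locs (line : String) : List (Int × Int) :=
  digA_loop line.toList 0 []

-- ===== PORT B =====
-- the 'for i, c in enumerate(line)' loop with run state, then the final flush
def digB_loop (cs : List Char) (i : Nat) (run : Option Nat) (acc : List (Int × Int)) :
    List (Int × Int) :=
  match cs with
  | [] =>
    match run with
    | some r => acc ++ [((r : Int), (i : Int))]
    | none => acc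
  | c :: rest =>
    if PySem.Chars.isdigit c then
      digB_loop rest (i + 1) (some (run.getD i)) acc
    else
      match run with
      | some r => digB_loop rest (i + 1) none (acc ++ [((r : Int), (i : Int))])
      | none => digB_loop rest (i + 1) none acc

def dig_locs_alt (line : String) : List (Int × Int) :=
  digB_loop line.toList 0 none []

-- ===== PRECONDITION & SPEC =====
def Spec_dig_locs (line : String) (out : List (Int × Int)) : Prop := out = dig_locs_alt line
instance (line : String) (out : List (Int × Int)) : Decidable (Spec_dig_locs line out) := by unfold Spec_dig_locs; infer_instance

-- ===== CLAIM (what is proved, stated in full; the proofs are below) =====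
def Claim_equal_dig_locs : Prop := ∀ (line : String), Dom_dig_locs line → Spec_dig_locs line (dig_locs line)

-- ===== LEMMAS AND PROOFS =====

theorem digA_inner_le (cs : List Char) (e : Nat) (h : e ≤ cs.length) :
    digA_inner cs e ≤ cs.length := by
  unfold digA_inner
  split
  · split
    · omega
    · exact digA_inner_le cs (e + 1) (by omega)
  · omega
termination_by cs.length - e

-- while the run is open, B scans to the first non-digit (= A's inner loop) and flushes (r, e)
theorem digB_run (cs : List Char) (start : Nat) (r : Nat) (acc : List (Int × Int))
    (h : start ≤ cs.length) :
    digB_loop (cs.drop start) start (some r) acc =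
      digB_loop (cs.drop (digA_inner cs start)) (digA_inner cs start) none
        (acc ++ [((r : Int), ((digA_inner cs start) : Int))]) := by
  unfold digA_inner
  split
  case isTrue hlt =>
    rw [List.drop_eq_getElem_cons hlt]
    split
    case isTrue hnd =>
      simp only [digB_loop]
      rw [if_neg (by simpa using hnd), List.drop_eq_getElem_cons hlt]
      simp only [digB_loop]
      rw [if_neg (by simpa using hnd)]
    case isFalse hd =>
      simp only [digB_loop]
      rw [if_pos (by simpa using hd)]
      simpa using digB_run cs (start + 1) r acc (by omega)
  case isFalse hge =>
    have hL : start = cs.length := by omega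
    subst hL
    simp [digB_loop]
termination_by cs.length - start

theorem loop_eq (cs : List Char) (start : Nat) (acc : List (Int × Int))
    (h : start ≤ cs.length) :
    digA_loop cs start acc = digB_loop (cs.drop start) start none acc := by
  unfold digA_loop
  split
  case isTrue hlt =>
    rw [List.drop_eq_getElem_cons hlt]
    split
    case isTrue hd =>
      simp only [digB_loop]
      rw [if_pos hd, Option.getD_none]
      rw [digB_run cs (start + 1) start acc (by omega)]
      have hle : digA_inner cs (start + 1) ≤ cs.length :=
        digA_inner_le cs (start + 1) (by omega)
      exact loop_eq cs (digA_inner cs (start + 1)) _ hle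
    case isFalse hd =>
      simp only [digB_loop]
      rw [if_neg hd]
      exact loop_eq cs (start + 1) acc (by omega)
  case isFalse hge =>
    have hL : start = cs.length := by omega
    subst hL
    simp [digB_loop]
termination_by cs.length - start
decreasing_by
  all_goals (have := digA_inner_ge cs (start + 1); omega)

-- ===== VERDICT (by name: the statement is the Claim_ definition above) =====
theorem dig_locs_spec : Claim_equal_dig_locs := by
  intro line _
  unfold Spec_dig_locs dig_locs dig_locs_alt
  simpa using loop_eq line.toList 0 [] (by omega)
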